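-- pv_equiv track=rewrite | github.com/LastTherapy/gamepulse | bot_with_viewer.py | grid_layer
-- ===== SOURCE A (Python) =====
-- GRID_STEP      = 4          # шаг узлов решётки
--
-- def grid_layer(spot, radius):
--     """hex’ы, у которых max(|dx|,|dy|)==radius • dx,dy кратны GRID_STEP"""
--     sx, sy = spot
--     for dq in range(-radius, radius+1):
--         for dr in range(-radius, radius+1):
--             if max(abs(dq), abs(dr)) != radius:
--                 continue
--             yield (sx + dq*GRID_STEP,
--                    sy + dr*GRID_STEP)
-- ===== SOURCE B (Python) =====
-- GRID_STEP = 4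
--
--
-- def grid_layer(spot, radius):
--     # Walk only the border cells: full row when |dq| == radius, two cells otherwise.
--     sx, sy = spot
--     for dq in range(-radius, radius + 1):
--         x = sx + dq * GRID_STEP
--         if abs(dq) == radius:
--             for dr in range(-radius, radius + 1):
--                 yield (x, sy + dr * GRID_STEP)
--         else:
--             yield (x, sy - radius * GRID_STEP)
--             yield (x, sy + radius * GRID_STEP)
-- ===== Notes on version B (the rewrite author's own statement) =====
-- stated objective: faster
-- what changed: Instead of scanning the full (2r+1)^2 square and filtering on max(|dq|,|dr|)==radius, B enumerates only the border cells directly: a full row when |dq|==radius, two cells otherwise, in the same order.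
import Mathlib
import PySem

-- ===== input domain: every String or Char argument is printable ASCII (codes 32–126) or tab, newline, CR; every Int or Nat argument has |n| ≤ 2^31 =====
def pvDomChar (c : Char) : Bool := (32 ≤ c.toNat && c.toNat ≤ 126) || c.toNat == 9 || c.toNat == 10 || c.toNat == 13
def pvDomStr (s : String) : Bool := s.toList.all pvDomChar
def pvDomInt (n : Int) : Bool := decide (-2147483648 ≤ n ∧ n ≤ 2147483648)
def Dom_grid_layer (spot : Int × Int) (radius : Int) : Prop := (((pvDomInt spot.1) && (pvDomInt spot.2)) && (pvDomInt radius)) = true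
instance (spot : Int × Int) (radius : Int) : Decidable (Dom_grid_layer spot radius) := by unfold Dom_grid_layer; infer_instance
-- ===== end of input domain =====

-- B enumerates only the border cells (full row when |dq| == radius, two cells otherwise)
-- instead of filtering the whole square: same output, asymptotically faster.


-- ===== PORT A =====
-- Nested loop over the full square, skipping cells with max(|dq|,|dr|) ≠ radius.
def grid_layer (spot : Int × Int) (radius : Int) : List (Int × Int) :=
  (PySem.List.pyRange (-radius) (radius + 1) 1).flatMap (fun dq =>
    (PySem.List.pyRange (-radius) (radius + 1) 1).flatMap (fun dr =>
      if max |dq| |dr| ≠ radius then []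
      else [(spot.1 + dq * 4, spot.2 + dr * 4)]))

-- ===== PORT B =====
-- Per-row border cells: a full row when |dq| = radius, otherwise the two edge cells.
def grid_layer_alt (spot : Int × Int) (radius : Int) : List (Int × Int) :=
  (PySem.List.pyRange (-radius) (radius + 1) 1).flatMap (fun dq =>
    let x := spot.1 + dq * 4
    if |dq| = radius then
      (PySem.List.pyRange (-radius) (radius + 1) 1).map (fun dr => (x, spot.2 + dr * 4))
    else
      [(x, spot.2 - radius * 4), (x, spot.2 + radius * 4)])

-- ===== PRECONDITION & SPEC =====
def Spec_grid_layer (spot : Int × Int) (radius : Int) (out : List (Int × Int)) : Prop := out = grid_layer_alt spot radius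
instance (spot : Int × Int) (radius : Int) (out : List (Int × Int)) : Decidable (Spec_grid_layer spot radius out) := by unfold Spec_grid_layer; infer_instance

-- ===== CLAIM (what is proved, stated in full; the proofs are below) =====
def Claim_equal_grid_layer : Prop := ∀ (spot : Int × Int) (radius : Int), Dom_grid_layer spot radius → Spec_grid_layer spot radius (grid_layer spot radius)

-- ===== LEMMAS AND PROOFS =====

theorem pv_flatMap_single {α β : Type} (l : List α) (f : α → β) :
    l.flatMap (fun a => [f a]) = l.map f := by
  induction l with
  | nil => rfl
  | cons a l ih => simp [List.flatMap_cons, ih]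

theorem pv_flatMap_congr {α β : Type} (l : List α) (f g : α → List β)
    (h : ∀ a ∈ l, f a = g a) : l.flatMap f = l.flatMap g := by
  induction l with
  | nil => rfl
  | cons a l ih =>
    simp only [List.flatMap_cons, h a (List.mem_cons_self), ih (fun b hb => h b (List.mem_cons_of_mem _ hb))]

-- the inner loop of A equals B's row for every dq in the range
theorem pv_row_eq (spot : Int × Int) (radius dq : Int)
    (h1 : -radius ≤ dq) (h2 : dq < radius + 1) :
    ((PySem.List.pyRange (-radius) (radius + 1) 1).flatMap (fun dr =>
      if max |dq| |dr| ≠ radius then []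
      else [(spot.1 + dq * 4, spot.2 + dr * 4)])) =
    (if |dq| = radius then
      (PySem.List.pyRange (-radius) (radius + 1) 1).map (fun dr => (spot.1 + dq * 4, spot.2 + dr * 4))
    else
      [(spot.1 + dq * 4, spot.2 - radius * 4), (spot.1 + dq * 4, spot.2 + radius * 4)]) := by
  have hr : 0 ≤ radius := by
    rcases abs_cases dq with ⟨h, _⟩ | ⟨h, _⟩ <;> omega
  by_cases hdq : |dq| = radius
  · rw [if_pos hdq]
    rw [pv_flatMap_congr _ _ (fun dr => [(spot.1 + dq * 4, spot.2 + dr * 4)])]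
    · exact pv_flatMap_single _ _
    · intro dr hdr
      rw [PySem.List.mem_pyRange_one] at hdr
      have : max |dq| |dr| = radius := by
        rcases abs_cases dr with ⟨h, _⟩ | ⟨h, _⟩ <;> omega
      simp [this]
  · rw [if_neg hdq]
    have habs : |dq| < radius := by
      rcases abs_cases dq with ⟨h, _⟩ | ⟨h, _⟩ <;> omega
    have hrpos : 0 < radius := by
      have : 0 ≤ |dq| := abs_nonneg dq
      omega
    rw [PySem.List.pyRange_one_cons (by omega),
        PySem.List.pyRange_one_succ_right (by omega)]
    rw [List.flatMap_cons, List.flatMap_append]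
    have hmid : ((PySem.List.pyRange (-radius + 1) radius 1).flatMap (fun dr =>
        if max |dq| |dr| ≠ radius then []
        else [(spot.1 + dq * 4, spot.2 + dr * 4)])) = [] := by
      rw [pv_flatMap_congr _ _ (fun _ => [])]
      · simp
      · intro dr hdr
        rw [PySem.List.mem_pyRange_one] at hdr
        have : max |dq| |dr| ≠ radius := by
          rcases abs_cases dr with ⟨h, _⟩ | ⟨h, _⟩ <;> omega
        simp [this]
    have hhi : max |dq| |radius| = radius := by
      rw [abs_of_nonneg hr]; omega
    rw [hmid]
    simp [hhi]
    ring

-- ===== VERDICT (by name: the statement is the Claim_ definition above) =====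
theorem grid_layer_spec : Claim_equal_grid_layer := by
  intro spot radius _
  unfold Spec_grid_layer grid_layer grid_layer_alt
  apply pv_flatMap_congr
  intro dq hdq
  rw [PySem.List.mem_pyRange_one] at hdq
  exact pv_row_eq spot radius dq hdq.1 hdq.2
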